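-- pv_equiv track=rewrite | github.com/Marten0612/SMR2-Lego-Sorter | main2.py | group_brick
-- ===== SOURCE A (Python) =====
-- brick = ['3005_1x1_Brick', '3004_1x2_Brick', '3622_1x3_Brick', '3010_1x4_Brick', \
--           '3009_1x6_Brick', '3008_1x8_Brick', '6111_1x10_Brick']
--
-- block = ['3003_2x2_Block', '3002_2x3_Block', '3001_2x4_Block', '2456_2x6_Block', \
--           '3007_2x8_Block', '3006_2x10_Block']
--
-- plate = ['3024_1x1_Plate', '3023_1x2_Plate', '3623_1x3_Plate', '3710_1x4_Plate', \
--          '78329_1x5_Plate', '3666_1x6_Plate', '3460_1x8_Plate', '4477_1x10_Plate']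
--
-- sheet = ['3022_2x2_Sheet', '3021_2x3_Sheet', '3020_2x4_Sheet', '3795_2x6_Sheet', \
--          '3034_2x8_Sheet', '3832_2x10_Sheet', '11212_3x3_Sheet', '3031_4x4_Sheet', \
--          '3032_4x6_Sheet', '3035_4x8_Sheet', '3030_4x10_Sheet']
--
-- tile = ['3070_1x1_Tile', '3069_1x2_Tile', '63864_1x3_Tile', '2431_1x4_Tile', \
--          '6636_1x6_Tile', '4162_1x8_Tile', '3068_2x2_Tile', '26603_2x3_Tile', \
--          '87079_2x4_Tile', '69729_2x6_Tile', '6934a_3x6_Tile']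
--
-- def group_brick(class_part):
--     group = ""
--     for x in brick:
--         if class_part == x:
--             group = 'brick'
--             break
--     for x in block:
--         if class_part == x:
--             group = 'block'
--             break
--     for x in plate:
--         if class_part == x:
--             group = 'plate'
--             break
--     for x in sheet:
--         if class_part == x:
--             group = 'sheet'
--             break
--     for x in tile:
--         if class_part == x:
--             group = 'tile'
--             break
--     if group == 'brick' or group == 'block' or group == 'plate' or group == 'sheet' or group == 'tile':
--         pass
--     else:
--         group = 'rest'
--     return group
-- ===== SOURCE B (Python) =====
-- brick = ['3005_1x1_Brick', '3004_1x2_Brick', '3622_1x3_Brick', '3010_1x4_Brick',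
--          '3009_1x6_Brick', '3008_1x8_Brick', '6111_1x10_Brick']
--
-- block = ['3003_2x2_Block', '3002_2x3_Block', '3001_2x4_Block', '2456_2x6_Block',
--          '3007_2x8_Block', '3006_2x10_Block']
--
-- plate = ['3024_1x1_Plate', '3023_1x2_Plate', '3623_1x3_Plate', '3710_1x4_Plate',
--          '78329_1x5_Plate', '3666_1x6_Plate', '3460_1x8_Plate', '4477_1x10_Plate']
--
-- sheet = ['3022_2x2_Sheet', '3021_2x3_Sheet', '3020_2x4_Sheet', '3795_2x6_Sheet',
--          '3034_2x8_Sheet', '3832_2x10_Sheet', '11212_3x3_Sheet', '3031_4x4_Sheet',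
--          '3032_4x6_Sheet', '3035_4x8_Sheet', '3030_4x10_Sheet']
--
-- tile = ['3070_1x1_Tile', '3069_1x2_Tile', '63864_1x3_Tile', '2431_1x4_Tile',
--         '6636_1x6_Tile', '4162_1x8_Tile', '3068_2x2_Tile', '26603_2x3_Tile',
--         '87079_2x4_Tile', '69729_2x6_Tile', '6934a_3x6_Tile']
--
-- # Every known part name ends in '_<Group>', so the group is not looked up at all:
-- # it is PARSED out of the name itself (suffix after the last underscore, lowercased).
-- # One flat set of all known names only decides known vs 'rest'.
-- all_parts = frozenset(brick + block + plate + sheet + tile)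
--
-- def group_brick(class_part):
--     if class_part in all_parts:
--         return class_part.rsplit('_', 1)[-1].lower()
--     return 'rest'
-- ===== Notes on version B (the rewrite author's own statement) =====
-- stated objective: alternative
-- what changed: Instead of scanning five lists to look the group up, B builds one flat frozenset of all known part names and parses the group out of the name itself (lowercased suffix after the last underscore), falling back to the catch-all group for unknown names; correct because every catalogued name ends with an underscore followed by its group's capitalised name.
import Mathlib
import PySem

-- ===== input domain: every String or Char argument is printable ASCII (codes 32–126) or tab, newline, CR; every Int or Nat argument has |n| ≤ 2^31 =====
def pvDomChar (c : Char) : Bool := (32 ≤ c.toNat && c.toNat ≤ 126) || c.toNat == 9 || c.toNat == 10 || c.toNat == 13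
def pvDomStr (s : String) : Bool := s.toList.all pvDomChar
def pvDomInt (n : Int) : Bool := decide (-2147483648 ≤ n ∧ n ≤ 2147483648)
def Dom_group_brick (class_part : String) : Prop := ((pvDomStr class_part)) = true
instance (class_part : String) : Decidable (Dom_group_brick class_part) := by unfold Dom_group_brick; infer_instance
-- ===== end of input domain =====

-- B does no group lookup at all: since every known name ends in '_<Group>', it checks the
-- name against one flat set of all known parts and PARSES the group out of the name itself
-- (lowercased text after the last underscore); unknown names get the catch-all group (alternative algorithm).

-- module-level data (shared by both programs, as in the Python module)
def brickL : List String := ["3005_1x1_Brick", "3004_1x2_Brick", "3622_1x3_Brick", "3010_1x4_Brick",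
  "3009_1x6_Brick", "3008_1x8_Brick", "6111_1x10_Brick"]
def blockL : List String := ["3003_2x2_Block", "3002_2x3_Block", "3001_2x4_Block", "2456_2x6_Block",
  "3007_2x8_Block", "3006_2x10_Block"]
def plateL : List String := ["3024_1x1_Plate", "3023_1x2_Plate", "3623_1x3_Plate", "3710_1x4_Plate",
  "78329_1x5_Plate", "3666_1x6_Plate", "3460_1x8_Plate", "4477_1x10_Plate"]
def sheetL : List String := ["3022_2x2_Sheet", "3021_2x3_Sheet", "3020_2x4_Sheet", "3795_2x6_Sheet",
  "3034_2x8_Sheet", "3832_2x10_Sheet", "11212_3x3_Sheet", "3031_4x4_Sheet",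
  "3032_4x6_Sheet", "3035_4x8_Sheet", "3030_4x10_Sheet"]
def tileL : List String := ["3070_1x1_Tile", "3069_1x2_Tile", "63864_1x3_Tile", "2431_1x4_Tile",
  "6636_1x6_Tile", "4162_1x8_Tile", "3068_2x2_Tile", "26603_2x3_Tile",
  "87079_2x4_Tile", "69729_2x6_Tile", "6934a_3x6_Tile"]

-- ===== PORT A =====
-- 'for x in xs: if class_part == x: group = lab; break' as structural recursion over xs
def scanA (cp lab : String) : List String → String → String
  | [], g => g
  | x :: rest, g => if cp == x then lab else scanA cp lab rest g

def group_brick (class_part : String) : String :=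
  let g := ""
  let g := scanA class_part "brick" brickL g
  let g := scanA class_part "block" blockL g
  let g := scanA class_part "plate" plateL g
  let g := scanA class_part "sheet" sheetL g
  let g := scanA class_part "tile" tileL g
  if g == "brick" || g == "block" || g == "plate" || g == "sheet" || g == "tile" then g
  else "rest"

-- ===== PORT B =====
-- frozenset(brick + block + plate + sheet + tile)
def all_parts : PySem.Set String :=
  PySem.Set.ofList (brickL ++ blockL ++ plateL ++ sheetL ++ tileL)

-- class_part.rsplit('_', 1)[-1]: the characters after the LAST '_' (whole string if none);
-- exact hand port: a left fold that restarts the segment at every '_'.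
def lastSeg (cs : List Char) : List Char :=
  cs.foldl (fun acc c => if c == '_' then [] else acc ++ [c]) []

def group_brick_alt (class_part : String) : String :=
  if PySem.Set.contains all_parts class_part then
    PySem.Str.lower (String.ofList (lastSeg class_part.toList))
  else "rest"

-- ===== PRECONDITION & SPEC =====
def Spec_group_brick (class_part : String) (out : String) : Prop := out = group_brick_alt class_part
instance (class_part : String) (out : String) : Decidable (Spec_group_brick class_part out) := by unfold Spec_group_brick; infer_instance

-- ===== CLAIM =====
def Claim_equal_group_brick : Prop := ∀ (class_part : String), Dom_group_brick class_part → Spec_group_brick class_part (group_brick class_part)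

-- ===== LEMMAS AND PROOFS =====

-- A's loop returns its label iff class_part occurs in the list
theorem scanA_eq (cp lab : String) (xs : List String) (g : String) :
    scanA cp lab xs g = if cp ∈ xs then lab else g := by
  induction xs with
  | nil => simp [scanA]
  | cons x rest ih =>
    simp only [scanA, ih, List.mem_cons, beq_iff_eq]
    split_ifs <;> simp_all

-- both sides agree when the name is in none of the five lists
theorem agree_of_not_mem (cp : String)
    (h1 : cp ∉ brickL) (h2 : cp ∉ blockL) (h3 : cp ∉ plateL)
    (h4 : cp ∉ sheetL) (h5 : cp ∉ tileL) :
    group_brick cp = group_brick_alt cp := by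
  have hc : cp ∉ all_parts := by
    simp [all_parts, PySem.Set.mem_ofList, h1, h2, h3, h4, h5]
  simp [group_brick, group_brick_alt, scanA_eq, h1, h2, h3, h4, h5, hc]

-- ===== VERDICT =====
set_option maxRecDepth 4096 in
theorem group_brick_spec : Claim_equal_group_brick := by
  intro cp _
  unfold Spec_group_brick
  by_cases h1 : cp ∈ brickL
  · fin_cases h1 <;> decide
  · by_cases h2 : cp ∈ blockL
    · fin_cases h2 <;> decide
    · by_cases h3 : cp ∈ plateL
      · fin_cases h3 <;> decide
      · by_cases h4 : cp ∈ sheetL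
        · fin_cases h4 <;> decide
        · by_cases h5 : cp ∈ tileL
          · fin_cases h5 <;> decide
          · exact agree_of_not_mem cp h1 h2 h3 h4 h5
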